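-- pv_equiv track=rewrite | github.com/WilliamMayor/scytale.xyz | scytale/ciphers/trifid.py | init_cton
-- ===== SOURCE A (Python) =====
-- def init_cton(key):
--     cton = {}
--     for i, c in enumerate(key):
--         box = (i % 9) // 3
--         row = i // 9
--         column = i % 3
--         cton[c] = "{box}{row}{column}".format(box=box, row=row, column=column)
--     return cton
-- ===== SOURCE B (Python) =====
-- def init_cton(key):
--     # Enumerate the 3x3x3 trifid cube (unbounded rows) and zip with the key.
--     coords = []
--     row = 0
--     while len(coords) < len(key):
--         for box in range(3):
--             for col in range(3):
--                 coords.append("{0}{1}{2}".format(box, row, col))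
--         row += 1
--     return dict(zip(key, coords))
-- ===== Notes on version B (the rewrite author's own statement) =====
-- stated objective: alternative
-- what changed: B enumerates the trifid cube itself with nested row/box/col loops and zips the generated coordinate stream with the key, instead of computing each coordinate arithmetically from the character's index.
import Mathlib
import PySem

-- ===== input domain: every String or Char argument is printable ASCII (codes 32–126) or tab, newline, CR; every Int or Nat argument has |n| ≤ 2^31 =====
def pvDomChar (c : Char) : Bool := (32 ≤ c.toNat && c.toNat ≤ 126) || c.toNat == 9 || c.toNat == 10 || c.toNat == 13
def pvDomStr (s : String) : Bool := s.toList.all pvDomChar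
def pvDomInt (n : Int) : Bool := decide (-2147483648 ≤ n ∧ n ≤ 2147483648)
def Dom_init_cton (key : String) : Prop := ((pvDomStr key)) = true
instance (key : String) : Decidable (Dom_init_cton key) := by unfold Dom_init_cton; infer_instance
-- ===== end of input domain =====

-- B enumerates the trifid cube with nested row/box/col loops and zips with the key
-- instead of computing coordinates arithmetically per index (objective: alternative).

-- ===== PORT A =====
-- A: for i, c in enumerate(key): cton[c] = f"{(i%9)//3}{i//9}{i%3}"
def init_cton (key : String) : List (String × String) :=
  ((PySem.List.enumerate key.toList).foldl
    (fun (d : PySem.Dict String String) p =>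
      let box := PySem.Int.floordiv (PySem.Int.mod p.1 9) 3
      let row := PySem.Int.floordiv p.1 9
      let column := PySem.Int.mod p.1 3
      d.insert (String.ofList [p.2]) (PySem.Int.toStr box ++ PySem.Int.toStr row ++ PySem.Int.toStr column))
    PySem.Dict.empty).items

-- ===== PORT B =====
-- one pass of B's inner nested loops: for box in range(3): for col in range(3): append f"{box}{row}{col}"
def cubeRow (row : Nat) : List String :=
  (List.range 3).flatMap (fun box =>
    (List.range 3).map (fun col =>
      PySem.Int.toStr (box : Int) ++ PySem.Int.toStr (row : Int) ++ PySem.Int.toStr (col : Int)))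

-- B's while loop: keep appending rows of 9 coords until at least `need` coords exist
def genCoords (need row : Nat) : List String :=
  if need = 0 then [] else cubeRow row ++ genCoords (need - 9) (row + 1)
termination_by need
decreasing_by omega

def init_cton_alt (key : String) : List (String × String) :=
  let coords := genCoords key.toList.length 0
  ((key.toList.zip coords).foldl
    (fun (d : PySem.Dict String String) p => d.insert (String.ofList [p.1]) p.2)
    PySem.Dict.empty).items

-- ===== PRECONDITION & SPEC =====
def Spec_init_cton (key : String) (out : List (String × String)) : Prop := out = init_cton_alt key
instance (key : String) (out : List (String × String)) : Decidable (Spec_init_cton key out) := by unfold Spec_init_cton; infer_instance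

-- ===== CLAIM (what is proved, stated in full; the proofs are below) =====
def Claim_equal_init_cton : Prop := ∀ (key : String), Dom_init_cton key → Spec_init_cton key (init_cton key)

-- ===== LEMMAS AND PROOFS =====

-- the coordinate string A computes for index k
def coordAt (k : Nat) : String :=
  PySem.Int.toStr ((k % 9 / 3 : Nat) : Int) ++ PySem.Int.toStr ((k / 9 : Nat) : Int)
    ++ PySem.Int.toStr ((k % 3 : Nat) : Int)

theorem genCoords_length_ge (need row : Nat) : need ≤ (genCoords need row).length := by
  induction need using Nat.strong_induction_on generalizing row with
  | _ need ih =>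
    rw [genCoords]
    split
    · omega
    · rename_i h
      have := ih (need - 9) (by omega) (row + 1)
      simp [cubeRow]
      omega

theorem cubeRow_get (row k : Nat) (hk : k < 9) :
    (cubeRow row)[k]? = some (PySem.Int.toStr ((k / 3 : Nat) : Int)
      ++ PySem.Int.toStr ((row : Nat) : Int) ++ PySem.Int.toStr ((k % 3 : Nat) : Int)) := by
  interval_cases k <;> simp [cubeRow, List.range_succ]

theorem genCoords_get (need row k : Nat) (hk : k < need) :
    (genCoords need row)[k]? = some (PySem.Int.toStr ((k % 9 / 3 : Nat) : Int)
      ++ PySem.Int.toStr ((row + k / 9 : Nat) : Int)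
      ++ PySem.Int.toStr ((k % 3 : Nat) : Int)) := by
  induction need using Nat.strong_induction_on generalizing row k with
  | _ need ih =>
    rw [genCoords]
    have hne : ¬ need = 0 := by omega
    simp only [hne, if_false]
    have hlen : (cubeRow row).length = 9 := by simp [cubeRow]
    by_cases h9 : k < 9
    · rw [List.getElem?_append_left (by omega)]
      rw [cubeRow_get row k h9]
      have e1 : k % 9 / 3 = k / 3 := by omega
      have e2 : row + k / 9 = row := by omega
      rw [e1, e2]
    · rw [List.getElem?_append_right (by omega), hlen]
      rw [ih (need - 9) (by omega) (row + 1) (k - 9) (by omega)]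
      have e1 : (k - 9) % 9 / 3 = k % 9 / 3 := by omega
      have e2 : row + 1 + (k - 9) / 9 = row + k / 9 := by omega
      have e3 : (k - 9) % 3 = k % 3 := by omega
      rw [e1, e2, e3]

theorem zip_getElem?_lt {a b : Type} (l : List a) (m : List b) (k : Nat)
    (h1 : k < l.length) (h2 : k < m.length) : (l.zip m)[k]? = some (l[k], m[k]) := by
  rw [List.getElem?_eq_getElem (by simp; omega)]
  simp [List.getElem_zip]

theorem coords_take (l : List Char) :
    l.zip (genCoords l.length 0) = (PySem.List.enumerate l).map (fun p => (p.2, coordAt p.1.toNat)) := by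
  apply List.ext_getElem?
  intro k
  by_cases hk : k < l.length
  · have hc : k < (genCoords l.length 0).length := by
      have := genCoords_length_ge l.length 0; omega
    rw [zip_getElem?_lt l _ k hk hc]
    have hg := genCoords_get l.length 0 k hk
    have hgel : (genCoords l.length 0)[k] = PySem.Int.toStr ((k % 9 / 3 : Nat) : Int)
        ++ PySem.Int.toStr ((0 + k / 9 : Nat) : Int) ++ PySem.Int.toStr ((k % 3 : Nat) : Int) := by
      have := List.getElem?_eq_getElem hc
      rw [this] at hg
      exact Option.some.inj hg
    rw [List.getElem?_map, PySem.List.getElem?_enumerate, List.getElem?_eq_getElem hk]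
    simp [hgel, coordAt]
  · rw [List.getElem?_eq_none (by simp; omega),
      List.getElem?_eq_none (by simp [PySem.List.length_enumerate]; omega)]

-- ===== VERDICT (by name: the statement is the Claim_ definition above) =====
theorem init_cton_spec : Claim_equal_init_cton := by
  intro key _
  unfold Spec_init_cton init_cton init_cton_alt
  congr 1
  have hmap : List.foldl (fun (d : PySem.Dict String String) q => d.insert q.1 q.2)
      PySem.Dict.empty
      ((PySem.List.enumerate key.toList).map (fun p : (Int × Char) =>
        (String.ofList [p.2],
          PySem.Int.toStr (PySem.Int.floordiv (PySem.Int.mod p.1 9) 3)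
          ++ PySem.Int.toStr (PySem.Int.floordiv p.1 9) ++ PySem.Int.toStr (PySem.Int.mod p.1 3))))
    = List.foldl (fun (d : PySem.Dict String String) q => d.insert q.1 q.2)
      PySem.Dict.empty
      ((key.toList.zip (genCoords key.toList.length 0)).map
        (fun p : (Char × String) => (String.ofList [p.1], p.2))) := by
    congr 1
    rw [coords_take, List.map_map]
    apply List.map_congr_left
    intro p hp
    obtain ⟨j, hj, rfl⟩ := (PySem.List.mem_enumerate_iff _ _ _).mp hp
    simp [coordAt]
  exact (List.foldl_map ..).symm.trans (hmap.trans (List.foldl_map ..))
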